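-- pv_equiv track=rewrite | github.com/mavergarah/mateovergara_app | electrical_lib/Cable_Calculations.py | electrode_conductor
-- ===== SOURCE A (Python) =====
-- def electrode_conductor(gauge_input,K):
--     """ Esta función selecciona el conductor del electrodo de puesta a tierra basado en
--     la tabla 250.66 de la NTC 2050 del 2021. La función busca la posición en la que se
--     encuentra el calibre ingresado por el usuario en el arreglo all_gauges. Sabiendo esa
--     posición se puede determinar en que rango está el calibre y seleccionar el conductor
--     del electrodo de puesta a tierra. Los rango son:
--     Cu: 2 AWG o menor --> Hasta la posición 8
--     Al: 1/0 AWG o menor --> Hasta la posición 10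
--     Cu: 1 AWG - 1/0 AWG --> 9 - 10
--     Al: 2/0 AWG - 3/0 AWG --> 11 - 12
--     Cu: 2/0 AWG - 3/0 AWG --> 11 - 12
--     Al: 4/0 AWG - 250 MCM --> 13 - 14
--     Cu: 4/0 AWG - 350 MCM --> 14 - 16
--     Al: 300 MCM - 500 MCM --> 15 - 18
--     Cu: 400 MCM - 600 MCM --> 17 - 19
--     Al: 500 MCM - 900 MCM --> 18 - 20
--     Cu: 750 MCM - 1000 MCM --> 20 en adelante
--     Al: 1000 MCM --> 21
--
--     """
--     all_gauges = ['14 AWG','12 AWG','10 AWG','8 AWG','6 AWG','4 AWG','3 AWG','2 AWG','1 AWG','1/0 AWG','2/0 AWG','3/0 AWG', '4/0 AWG','250 MCM','300 MCM','350 MCM','400 MCM','500 MCM','600 MCM','750 MCM','1000 MCM']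
--     i = 1
--
--     while not gauge_input == all_gauges[i-1]:
--         i = i + 1
--
--     if K == 'Cu':
--         if i <= 8:
--             ground_cu = '8 AWG'
--             ground_al = '6 AWG'
--         elif i <= 10:
--             ground_cu = '6 AWG'
--             ground_al = '4 AWG'
--         elif i <= 12:
--             ground_cu = '4 AWG'
--             ground_al = '2 AWG'
--         elif i <= 16:
--             ground_cu = '2 AWG'
--             ground_al = '1/0 AWG'
--         elif i <= 19:
--             ground_cu = '1/0 AWG'
--             ground_al = '3/0 AWG'
--         elif i >= 20:
--             ground_cu = '2/0 AWG'
--             ground_al = '4/0 AWG'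
--         else:
--             ground_cu = 'No gauge'
--             ground_al = 'No gauge'
--     else:
--         if i <= 10:
--             ground_cu = '8 AWG'
--             ground_al = '6 AWG'
--         elif i <= 12:
--             ground_cu = '6 AWG'
--             ground_al = '4 AWG'
--         elif i <= 14:
--             ground_cu = '4 AWG'
--             ground_al = '2 AWG'
--         elif i <= 18:
--             ground_cu = '2 AWG'
--             ground_al = '1/0 AWG'
--         elif i <= 20:
--             ground_cu = '1/0 AWG'
--             ground_al = '3/0 AWG'
--         elif i >= 21:
--             ground_cu = '2/0 AWG'
--             ground_al = '4/0 AWG'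
--         else:
--             ground_cu = 'No gauge'
--             ground_al = 'No gauge'
--
--     return ground_cu, ground_al
-- ===== SOURCE B (Python) =====
-- # NTC 2050 table 250.66, flattened to a direct per-gauge lookup: each feeder gauge
-- # maps straight to its (copper ground, aluminium ground) pair -- no position scan,
-- # no threshold comparisons.
-- _GROUND_CU = {
--     '14 AWG': ('8 AWG', '6 AWG'), '12 AWG': ('8 AWG', '6 AWG'),
--     '10 AWG': ('8 AWG', '6 AWG'), '8 AWG': ('8 AWG', '6 AWG'),
--     '6 AWG': ('8 AWG', '6 AWG'), '4 AWG': ('8 AWG', '6 AWG'),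
--     '3 AWG': ('8 AWG', '6 AWG'), '2 AWG': ('8 AWG', '6 AWG'),
--     '1 AWG': ('6 AWG', '4 AWG'), '1/0 AWG': ('6 AWG', '4 AWG'),
--     '2/0 AWG': ('4 AWG', '2 AWG'), '3/0 AWG': ('4 AWG', '2 AWG'),
--     '4/0 AWG': ('2 AWG', '1/0 AWG'), '250 MCM': ('2 AWG', '1/0 AWG'),
--     '300 MCM': ('2 AWG', '1/0 AWG'), '350 MCM': ('2 AWG', '1/0 AWG'),
--     '400 MCM': ('1/0 AWG', '3/0 AWG'), '500 MCM': ('1/0 AWG', '3/0 AWG'),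
--     '600 MCM': ('1/0 AWG', '3/0 AWG'), '750 MCM': ('2/0 AWG', '4/0 AWG'),
--     '1000 MCM': ('2/0 AWG', '4/0 AWG'),
-- }
-- _GROUND_AL = {
--     '14 AWG': ('8 AWG', '6 AWG'), '12 AWG': ('8 AWG', '6 AWG'),
--     '10 AWG': ('8 AWG', '6 AWG'), '8 AWG': ('8 AWG', '6 AWG'),
--     '6 AWG': ('8 AWG', '6 AWG'), '4 AWG': ('8 AWG', '6 AWG'),
--     '3 AWG': ('8 AWG', '6 AWG'), '2 AWG': ('8 AWG', '6 AWG'),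
--     '1 AWG': ('8 AWG', '6 AWG'), '1/0 AWG': ('8 AWG', '6 AWG'),
--     '2/0 AWG': ('6 AWG', '4 AWG'), '3/0 AWG': ('6 AWG', '4 AWG'),
--     '4/0 AWG': ('4 AWG', '2 AWG'), '250 MCM': ('4 AWG', '2 AWG'),
--     '300 MCM': ('2 AWG', '1/0 AWG'), '350 MCM': ('2 AWG', '1/0 AWG'),
--     '400 MCM': ('2 AWG', '1/0 AWG'), '500 MCM': ('2 AWG', '1/0 AWG'),
--     '600 MCM': ('1/0 AWG', '3/0 AWG'), '750 MCM': ('1/0 AWG', '3/0 AWG'),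
--     '1000 MCM': ('2/0 AWG', '4/0 AWG'),
-- }
--
-- def electrode_conductor(gauge_input, K):
--     return (_GROUND_CU if K == 'Cu' else _GROUND_AL)[gauge_input]
-- ===== Notes on version B (the rewrite author's own statement) =====
-- stated objective: simpler
-- what changed: Eliminates the positional while-scan and both if/elif threshold chains entirely: the NTC 250.66 table is flattened into two per-material dictionaries keyed directly by gauge name, and the function is a single dict lookup.
import Mathlib
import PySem

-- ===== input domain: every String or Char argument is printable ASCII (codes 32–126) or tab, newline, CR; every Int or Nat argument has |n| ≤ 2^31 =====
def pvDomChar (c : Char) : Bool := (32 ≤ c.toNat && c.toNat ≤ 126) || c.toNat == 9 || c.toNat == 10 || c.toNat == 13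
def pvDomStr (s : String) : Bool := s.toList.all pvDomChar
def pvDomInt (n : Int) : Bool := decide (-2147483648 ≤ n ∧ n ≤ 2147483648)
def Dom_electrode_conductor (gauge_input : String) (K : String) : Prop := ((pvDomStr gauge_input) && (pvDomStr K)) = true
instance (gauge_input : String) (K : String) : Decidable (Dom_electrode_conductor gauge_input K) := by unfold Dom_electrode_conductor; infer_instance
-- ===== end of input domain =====

-- B replaces A's positional scan and threshold chains with a direct per-gauge dictionary
-- lookup (objective: simpler). Both raise when the gauge is absent from the table.

-- ===== PORT A =====
def pvAllGauges : List String :=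
  ["14 AWG","12 AWG","10 AWG","8 AWG","6 AWG","4 AWG","3 AWG","2 AWG","1 AWG","1/0 AWG",
   "2/0 AWG","3/0 AWG","4/0 AWG","250 MCM","300 MCM","350 MCM","400 MCM","500 MCM",
   "600 MCM","750 MCM","1000 MCM"]

-- A's while loop scans positions 1,2,… comparing gauge_input with all_gauges[i-1];
-- ported as structural recursion over the list; none = the loop's IndexError (outside Pre_).
def pvScanA (gauge_input : String) : List String → Int → Option Int
  | [], _ => none
  | g :: rest, i => if gauge_input == g then some i else pvScanA gauge_input rest (i + 1)

def electrode_conductor (gauge_input : String) (K : String) : String × String :=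
  match pvScanA gauge_input pvAllGauges 1 with
  | none => ("No gauge", "No gauge")  -- unreachable under Pre_ (A raises IndexError here)
  | some i =>
    if K == "Cu" then
      if i ≤ 8 then ("8 AWG", "6 AWG")
      else if i ≤ 10 then ("6 AWG", "4 AWG")
      else if i ≤ 12 then ("4 AWG", "2 AWG")
      else if i ≤ 16 then ("2 AWG", "1/0 AWG")
      else if i ≤ 19 then ("1/0 AWG", "3/0 AWG")
      else if i ≥ 20 then ("2/0 AWG", "4/0 AWG")
      else ("No gauge", "No gauge")
    else
      if i ≤ 10 then ("8 AWG", "6 AWG")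
      else if i ≤ 12 then ("6 AWG", "4 AWG")
      else if i ≤ 14 then ("4 AWG", "2 AWG")
      else if i ≤ 18 then ("2 AWG", "1/0 AWG")
      else if i ≤ 20 then ("1/0 AWG", "3/0 AWG")
      else if i ≥ 21 then ("2/0 AWG", "4/0 AWG")
      else ("No gauge", "No gauge")

-- ===== PORT B =====
def pvGroundCu : PySem.Dict String (String × String) := PySem.Dict.ofList
  [("14 AWG", ("8 AWG", "6 AWG")), ("12 AWG", ("8 AWG", "6 AWG")),
   ("10 AWG", ("8 AWG", "6 AWG")), ("8 AWG", ("8 AWG", "6 AWG")),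
   ("6 AWG", ("8 AWG", "6 AWG")), ("4 AWG", ("8 AWG", "6 AWG")),
   ("3 AWG", ("8 AWG", "6 AWG")), ("2 AWG", ("8 AWG", "6 AWG")),
   ("1 AWG", ("6 AWG", "4 AWG")), ("1/0 AWG", ("6 AWG", "4 AWG")),
   ("2/0 AWG", ("4 AWG", "2 AWG")), ("3/0 AWG", ("4 AWG", "2 AWG")),
   ("4/0 AWG", ("2 AWG", "1/0 AWG")), ("250 MCM", ("2 AWG", "1/0 AWG")),
   ("300 MCM", ("2 AWG", "1/0 AWG")), ("350 MCM", ("2 AWG", "1/0 AWG")),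
   ("400 MCM", ("1/0 AWG", "3/0 AWG")), ("500 MCM", ("1/0 AWG", "3/0 AWG")),
   ("600 MCM", ("1/0 AWG", "3/0 AWG")), ("750 MCM", ("2/0 AWG", "4/0 AWG")),
   ("1000 MCM", ("2/0 AWG", "4/0 AWG"))]

def pvGroundAl : PySem.Dict String (String × String) := PySem.Dict.ofList
  [("14 AWG", ("8 AWG", "6 AWG")), ("12 AWG", ("8 AWG", "6 AWG")),
   ("10 AWG", ("8 AWG", "6 AWG")), ("8 AWG", ("8 AWG", "6 AWG")),
   ("6 AWG", ("8 AWG", "6 AWG")), ("4 AWG", ("8 AWG", "6 AWG")),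
   ("3 AWG", ("8 AWG", "6 AWG")), ("2 AWG", ("8 AWG", "6 AWG")),
   ("1 AWG", ("8 AWG", "6 AWG")), ("1/0 AWG", ("8 AWG", "6 AWG")),
   ("2/0 AWG", ("6 AWG", "4 AWG")), ("3/0 AWG", ("6 AWG", "4 AWG")),
   ("4/0 AWG", ("4 AWG", "2 AWG")), ("250 MCM", ("4 AWG", "2 AWG")),
   ("300 MCM", ("2 AWG", "1/0 AWG")), ("350 MCM", ("2 AWG", "1/0 AWG")),
   ("400 MCM", ("2 AWG", "1/0 AWG")), ("500 MCM", ("2 AWG", "1/0 AWG")),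
   ("600 MCM", ("1/0 AWG", "3/0 AWG")), ("750 MCM", ("1/0 AWG", "3/0 AWG")),
   ("1000 MCM", ("2/0 AWG", "4/0 AWG"))]

def electrode_conductor_alt (gauge_input : String) (K : String) : String × String :=
  match PySem.Dict.get? (if K == "Cu" then pvGroundCu else pvGroundAl) gauge_input with
  | some p => p
  | none => ("No gauge", "No gauge")  -- B raises KeyError here (outside Pre_)

-- ===== PRECONDITION & SPEC =====
-- Pre_ excludes exactly the inputs where gauge_input is not an NTC table gauge:
-- there A raises IndexError (overrunning scan) and B raises KeyError (dict lookup).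
def Pre_electrode_conductor (gauge_input : String) (_K : String) : Prop :=
  gauge_input ∈ pvAllGauges
instance (gauge_input : String) (K : String) : Decidable (Pre_electrode_conductor gauge_input K) := by
  unfold Pre_electrode_conductor; infer_instance

def pvWitness_electrode_conductor : String × String := ("2 AWG", "Cu")

def Spec_electrode_conductor (gauge_input : String) (K : String) (out : String × String) : Prop :=
  out = electrode_conductor_alt gauge_input K
instance (gauge_input : String) (K : String) (out : String × String) : Decidable (Spec_electrode_conductor gauge_input K out) := by
  unfold Spec_electrode_conductor; infer_instance

-- ===== CLAIM (what is proved, stated in full; the proofs are below) =====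
def Claim_equal_electrode_conductor : Prop := ∀ (gauge_input : String) (K : String), Dom_electrode_conductor gauge_input K → Pre_electrode_conductor gauge_input K → Spec_electrode_conductor gauge_input K (electrode_conductor gauge_input K)

-- ===== LEMMAS AND PROOFS =====

-- ===== VERDICT (by name: the statement is the Claim_ definition above) =====
theorem electrode_conductor_spec : Claim_equal_electrode_conductor := by
  intro g K _ hpre
  unfold Pre_electrode_conductor pvAllGauges at hpre
  unfold Spec_electrode_conductor
  by_cases hK : (K == "Cu") = true
  · fin_cases hpre <;>
      (simp only [electrode_conductor, electrode_conductor_alt, hK]; decide)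
  · simp only [Bool.not_eq_true] at hK
    fin_cases hpre <;>
      (simp only [electrode_conductor, electrode_conductor_alt, hK]; decide)
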